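-- pv_equiv track=rewrite | github.com/gabriela2002new/Gabriela_Cretu_SP25 | Python-module/module_2.py | task_4
-- ===== SOURCE A (Python) =====
-- from typing import Any, Dict, List, Tuple
-- from typing import Dict
-- from typing import Dict, Any, List
-- from typing import Dict
--
-- def task_4(data: Dict[str, int]):
--     max1 = float('-inf')
--     max2 = float('-inf')
--     max3 = float('-inf')
--     key_max1 = key_max2 = key_max3 = None
--
--     for key, val in data.items():
--         if val > max1:
--             max3, key_max3 = max2, key_max2
--             max2, key_max2 = max1, key_max1
--             max1, key_max1 = val, key
--         elif val > max2:
--             max3, key_max3 = max2, key_max2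
--             max2, key_max2 = val, key
--         elif val > max3:
--             max3, key_max3 = val, key
--
--     result = []
--     if key_max1 is not None:
--         result.append(key_max1)
--     if key_max2 is not None:
--         result.append(key_max2)
--     if key_max3 is not None:
--         result.append(key_max3)
--
--     return result
-- ===== SOURCE B (Python) =====
-- def task_4(data):
--     items = sorted(data.items(), key=lambda kv: kv[1], reverse=True)
--     return [k for k, _ in items[:3]]
-- ===== Notes on version B (the rewrite author's own statement) =====
-- stated objective: idiomatic
-- what changed: Replaces A's hand-rolled single-pass running top-3 slot tracking with a stable descending sort of the items followed by taking the first 3 keys; stability reproduces A's strict-> earliest-wins tie-breaking.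
import Mathlib
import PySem

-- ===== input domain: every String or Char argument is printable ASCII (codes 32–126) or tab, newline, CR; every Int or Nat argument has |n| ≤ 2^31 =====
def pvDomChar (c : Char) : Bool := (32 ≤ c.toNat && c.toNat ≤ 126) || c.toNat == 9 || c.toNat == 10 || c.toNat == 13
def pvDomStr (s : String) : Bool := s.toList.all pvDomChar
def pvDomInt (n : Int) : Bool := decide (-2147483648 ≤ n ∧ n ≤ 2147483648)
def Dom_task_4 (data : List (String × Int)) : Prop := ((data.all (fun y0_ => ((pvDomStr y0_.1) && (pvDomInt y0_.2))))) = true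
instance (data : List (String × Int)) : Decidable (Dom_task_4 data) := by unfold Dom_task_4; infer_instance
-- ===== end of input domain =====

-- B replaces A's single-pass running top-3 slot tracking with a stable descending
-- sort of the items followed by taking the first three keys (same tie-breaking).

-- ===== PORT A =====
-- A's loop state: (max1, key_max1, max2, key_max2, max3, key_max3); the float '-inf'
-- sentinel is modelled as `none` (every int compares greater than it, and key is
-- None exactly while its max is still '-inf').
def Task4State : Type := Option Int × Option String × Option Int × Option String × Option Int × Option String

-- 'val > m' where m is an int or float('-inf')
def task4Gt (v : Int) (m : Option Int) : Bool :=
  match m with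
  | none => true
  | some m => decide (m < v)

def task4Step (st : Task4State) (kv : String × Int) : Task4State :=
  match st, kv with
  | (m1, k1, m2, k2, m3, _k3), (key, val) =>
    if task4Gt val m1 then (some val, some key, m1, k1, m2, k2)
    else if task4Gt val m2 then (m1, k1, some val, some key, m2, k2)
    else if task4Gt val m3 then (m1, k1, m2, k2, some val, some key)
    else st

-- 'if key_maxi is not None: result.append(key_maxi)'
def task4Append (r : List String) (k : Option String) : List String :=
  match k with
  | none => r
  | some key => r ++ [key]

def task_4 (data : List (String × Int)) : List String :=
  match data.foldl task4Step ((none, none, none, none, none, none) : Task4State) with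
  | (_m1, k1, _m2, k2, _m3, k3) => task4Append (task4Append (task4Append [] k1) k2) k3

-- ===== PORT B =====
def task_4_alt (data : List (String × Int)) : List String :=
  ((PySem.List.sorted data (fun kv => kv.2) true).take 3).map Prod.fst

-- ===== PRECONDITION & SPEC =====
def Spec_task_4 (data : List (String × Int)) (out : List String) : Prop := out = task_4_alt data
instance (data : List (String × Int)) (out : List String) : Decidable (Spec_task_4 data out) := by unfold Spec_task_4; infer_instance

-- ===== CLAIM (what is proved, stated in full; the proofs are below) =====
def Claim_equal_task_4 : Prop := ∀ (data : List (String × Int)), Dom_task_4 data → Spec_task_4 data (task_4 data)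

-- ===== LEMMAS AND PROOFS =====

-- the comparison used by Python's stable descending sort on the value key
def task4Bef (x y : String × Int) : Bool := decide (y.2 < x.2)

-- B's step on the truncated list: insert, keep the best three
def task4BStep (acc : List (String × Int)) (x : String × Int) : List (String × Int) :=
  (PySem.List.insertBy task4Bef x acc).take 3

-- encode a (≤ 3)-element best-so-far list as A's slot state
def task4Encode : List (String × Int) → Task4State
  | [] => (none, none, none, none, none, none)
  | [a] => (some a.2, some a.1, none, none, none, none)
  | [a, b] => (some a.2, some a.1, some b.2, some b.1, none, none)
  | a :: b :: c :: _ => (some a.2, some a.1, some b.2, some b.1, some c.2, some c.1)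

-- truncation commutes with insertBy
theorem take_insertBy {α : Type} (b : α → α → Bool) (x : α) (l : List α) (n : Nat) :
    (PySem.List.insertBy b x l).take n = (PySem.List.insertBy b x (l.take n)).take n := by
  induction l generalizing n with
  | nil => simp
  | cons y ys ih =>
    cases n with
    | zero => simp
    | succ m =>
      simp only [List.take_succ_cons, PySem.List.insertBy]
      by_cases h : b x y
      · cases m with
        | zero => simp [h]
        | succ n => simp [h, List.take_take]
      · simp [h, ih m]

-- A's step on the encoded state is B's insert-and-truncate step
theorem task4_step_commute (t : List (String × Int)) (x : String × Int)
    (h : t.length ≤ 3) : task4Step (task4Encode t) x = task4Encode (task4BStep t x) := by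
  obtain ⟨key, val⟩ := x
  match t, h with
  | [], _ =>
      simp [task4Step, task4BStep, task4Encode, task4Gt, PySem.List.insertBy]
  | [a], _ =>
      simp only [task4Step, task4BStep, task4Encode, task4Gt, task4Bef, PySem.List.insertBy]
      by_cases h1 : a.2 < val <;> simp [h1]
  | [a, b], _ =>
      simp only [task4Step, task4BStep, task4Encode, task4Gt, task4Bef, PySem.List.insertBy]
      by_cases h1 : a.2 < val <;> by_cases h2 : b.2 < val <;> simp [h1, h2]
  | [a, b, c], _ =>
      simp only [task4Step, task4BStep, task4Encode, task4Gt, task4Bef, PySem.List.insertBy]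
      by_cases h1 : a.2 < val <;> by_cases h2 : b.2 < val <;> by_cases h3 : c.2 < val <;>
        simp [h1, h2, h3]

theorem task4BStep_len (t : List (String × Int)) (x : String × Int) :
    (task4BStep t x).length ≤ 3 := by
  simp only [task4BStep]
  exact List.length_take_le 3 (PySem.List.insertBy task4Bef x t)

-- the whole folds agree through the encoding
theorem task4_fold_commute (data : List (String × Int)) (t : List (String × Int))
    (h : t.length ≤ 3) :
    data.foldl task4Step (task4Encode t) = task4Encode (data.foldl task4BStep t) := by
  induction data generalizing t with
  | nil => rfl
  | cons x xs ih =>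
    simp only [List.foldl_cons, task4_step_commute t x h]
    exact ih _ (task4BStep_len t x)

-- the first three of the descending insertion sort are the fold of insert-and-truncate
theorem task4_sorted_take3 (data : List (String × Int)) (acc : List (String × Int)) :
    (data.foldl (fun acc x => PySem.List.insertBy task4Bef x acc) acc).take 3 =
      data.foldl task4BStep (acc.take 3) := by
  induction data generalizing acc with
  | nil => rfl
  | cons x xs ih =>
    simp only [List.foldl_cons, ih]
    congr 1
    exact take_insertBy task4Bef x acc 3

-- reading the keys out of the encoded state is mapping fst over the list
theorem task4_decode (t : List (String × Int)) (h : t.length ≤ 3) :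
    (match task4Encode t with
      | (_m1, k1, _m2, k2, _m3, k3) => task4Append (task4Append (task4Append [] k1) k2) k3) =
      t.map Prod.fst := by
  match t, h with
  | [], _ => rfl
  | [a], _ => rfl
  | [a, b], _ => rfl
  | [a, b, c], _ => rfl

-- ===== VERDICT (by name: the statement is the Claim_ definition above) =====
theorem task_4_spec : Claim_equal_task_4 := by
  intro data _
  show task_4 data = task_4_alt data
  unfold task_4 task_4_alt
  rw [PySem.List.sorted_rev_eq_foldl_insertBy]
  have hfold := task4_fold_commute data [] (by simp)
  have hsort : (List.foldl (fun acc x => PySem.List.insertBy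
      (fun a b : String × Int => decide (b.2 < a.2)) x acc) [] data).take 3 =
      List.foldl task4BStep ([] : List (String × Int)) data := task4_sorted_take3 data []
  rw [hsort]
  have hlen : (data.foldl task4BStep []).length ≤ 3 := by
    induction data using List.reverseRecOn with
    | nil => simp
    | append_singleton xs x _ => simpa [List.foldl_append] using task4BStep_len _ x
  calc (match data.foldl task4Step ((none, none, none, none, none, none) : Task4State) with
        | (_m1, k1, _m2, k2, _m3, k3) =>
            task4Append (task4Append (task4Append [] k1) k2) k3)
      = (match task4Encode (data.foldl task4BStep []) with
        | (_m1, k1, _m2, k2, _m3, k3) =>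
            task4Append (task4Append (task4Append [] k1) k2) k3) := by
          rw [show ((none, none, none, none, none, none) : Task4State) = task4Encode [] from rfl,
            hfold]
    _ = (data.foldl task4BStep []).map Prod.fst := task4_decode _ hlen
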